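-- pv_equiv track=rewrite | github.com/deveucatur/ninebox-streamlit | testes.py | limpar_porc
-- ===== SOURCE A (Python) =====
-- def limpar_porc(number_string):
--     number = ''
--     for a in number_string:
--         if a == '.':
--             break
--
--         elif a.isdigit():
--             number = number + a
--
--     return int(number)
-- ===== SOURCE B (Python) =====
-- def limpar_porc(number_string):
--     head, _, _ = number_string.partition('.')
--     for ch in set(head):
--         if not ch.isdigit():
--             head = head.replace(ch, '')
--     return int(head)
-- ===== Notes on version B (the rewrite author's own statement) =====
-- stated objective: alternative
-- what changed: Instead of one positional scan with a break that accumulates a digit string, B cuts the head off at the first dot with partition, then iterates over the DISTINCT characters of that head and deletes each non-digit character class globally with str.replace (order of deletions provably irrelevant) before the final int().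
import Mathlib
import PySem

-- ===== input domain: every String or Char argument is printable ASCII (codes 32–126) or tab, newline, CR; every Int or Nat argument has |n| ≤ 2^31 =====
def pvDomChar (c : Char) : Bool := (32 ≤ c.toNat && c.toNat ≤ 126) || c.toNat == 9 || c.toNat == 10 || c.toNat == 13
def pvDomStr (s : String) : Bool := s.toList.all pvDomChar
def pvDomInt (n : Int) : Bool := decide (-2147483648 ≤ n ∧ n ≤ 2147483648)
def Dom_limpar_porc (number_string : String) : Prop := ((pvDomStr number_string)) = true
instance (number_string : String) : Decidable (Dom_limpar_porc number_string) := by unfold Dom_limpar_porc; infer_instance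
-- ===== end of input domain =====

-- B cuts the head at the first '.' and deletes each distinct non-digit character class by a global replace, then parses; same cost class, different traversal.

-- ===== PORT A =====
-- A's for-loop with break: structural recursion over the characters, accumulator = the digit string built so far.
def pvLoopA : List Char → List Char → List Char
  | [], number => number
  | a :: rest, number =>
    if a == '.' then number
    else if PySem.Chars.isdigit a then pvLoopA rest (number ++ [a])
    else pvLoopA rest number

-- int(number): Python raises ValueError when number is empty (excluded by Pre_), where the port returns the getD default.
def limpar_porc (number_string : String) : Int :=
  (PySem.Int.ofChars? (pvLoopA number_string.toList [])).getD 0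

-- ===== PORT B =====
-- head.partition('.')[0] has no PySem primitive; ported by hand as takeWhile (· ≠ '.'), exact for the single-character separator '.'.
-- set(head) is PySem.Set.ofList; head.replace(ch, '') is PySem.Chars.replace; int(head) is PySem.Int.ofChars? (getD default where Python raises, outside Pre_).
def limpar_porc_alt (number_string : String) : Int :=
  let head0 := number_string.toList.takeWhile (fun a => !(a == '.'))
  let head := (PySem.Set.ofList head0).foldl
    (fun h ch => if !(PySem.Chars.isdigit ch) then PySem.Chars.replace h [ch] [] else h) head0
  (PySem.Int.ofChars? head).getD 0

-- ===== PRECONDITION & SPEC =====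
-- Pre_ excludes exactly the inputs with no digit before the first '.', on which both A and B raise ValueError (int() of an empty string).
def Pre_limpar_porc (number_string : String) : Prop :=
  (number_string.toList.takeWhile (fun a => !(a == '.'))).any PySem.Chars.isdigit = true
instance (number_string : String) : Decidable (Pre_limpar_porc number_string) := by unfold Pre_limpar_porc; infer_instance
def pvWitness_limpar_porc : String := "12.5"

def Spec_limpar_porc (number_string : String) (out : Int) : Prop := out = limpar_porc_alt number_string
instance (number_string : String) (out : Int) : Decidable (Spec_limpar_porc number_string out) := by unfold Spec_limpar_porc; infer_instance

-- ===== CLAIM (what is proved, stated in full; the proofs are below) =====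
def Claim_equal_limpar_porc : Prop := ∀ (number_string : String), Dom_limpar_porc number_string → Pre_limpar_porc number_string → Spec_limpar_porc number_string (limpar_porc number_string)

-- ===== LEMMAS AND PROOFS =====

-- A's loop collects exactly the digits of the prefix before the first '.'.
theorem pvLoopA_eq (l acc : List Char) :
    pvLoopA l acc = acc ++ (l.takeWhile (fun a => !(a == '.'))).filter PySem.Chars.isdigit := by
  induction l generalizing acc with
  | nil => simp [pvLoopA]
  | cons a rest ih =>
    by_cases h : a = '.'
    · simp [pvLoopA, h]
    · by_cases hd : PySem.Chars.isdigit a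
      · simp [pvLoopA, h, hd, ih]
      · simp [pvLoopA, h, hd, ih]

-- replace with a single-character pattern and empty replacement is a filter.
theorem pvReplaceGo (c : Char) (fuel : Nat) (l acc : List Char) (hf : l.length ≤ fuel) :
    PySem.Chars.replace.go [c] [] fuel l acc = acc.reverse ++ l.filter (fun a => !(a == c)) := by
  induction fuel generalizing l acc with
  | zero =>
    have : l = [] := List.length_eq_zero_iff.mp (Nat.le_zero.mp hf)
    simp [this, PySem.Chars.replace.go]
  | succ n ih =>
    cases l with
    | nil => simp [PySem.Chars.replace.go]
    | cons a rest =>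
      have hr : rest.length ≤ n := by simpa using hf
      by_cases h : a = c
      · simp [PySem.Chars.replace.go, h, List.isPrefixOf, ih rest acc hr]
      · have hp : List.isPrefixOf [c] (a :: rest) = false := by
          simp [List.isPrefixOf]; exact fun hc => h hc.symm
        simp [PySem.Chars.replace.go, hp, h, ih rest (a :: acc) hr]

theorem pvReplaceOne (l : List Char) (c : Char) :
    PySem.Chars.replace l [c] [] = l.filter (fun a => !(a == c)) := by
  simpa using pvReplaceGo c l.length l [] (le_refl _)

-- folding the per-character deletion over any list L filters out exactly the non-digit characters occurring in L.
theorem pvFoldDelete (L : List Char) (h : List Char) :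
    L.foldl (fun h ch => if !(PySem.Chars.isdigit ch) then PySem.Chars.replace h [ch] [] else h) h
      = h.filter (fun a => PySem.Chars.isdigit a || !(L.contains a)) := by
  induction L generalizing h with
  | nil => simp [List.filter_eq_self.mpr]
  | cons c L ih =>
    by_cases hc : PySem.Chars.isdigit c
    · simp only [List.foldl_cons, hc, Bool.not_true, Bool.false_eq_true, if_false, ih]
      apply List.filter_congr
      intro a _
      by_cases hac : a = c
      · simp [hac, hc]
      · simp [fun hh => hac (by exact hh)]
    · simp only [List.foldl_cons, hc, Bool.not_false, if_true]
      rw [ih, pvReplaceOne, List.filter_filter]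
      apply List.filter_congr
      intro a _
      by_cases hac : a = c
      · simp [hac, hc]
      · simp [hac]

-- ===== VERDICT (by name: the statement is the Claim_ definition above) =====
theorem limpar_porc_spec : Claim_equal_limpar_porc := by
  intro s _ _
  unfold Spec_limpar_porc limpar_porc limpar_porc_alt
  simp only [pvLoopA_eq, pvFoldDelete, List.nil_append]
  congr 2
  apply (List.filter_congr _).symm
  intro a ha
  simp
  exact fun h => absurd ha h
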